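-- pv_equiv track=rewrite | github.com/matthieu637/anne | src/utils.py | charge_to_indice
-- ===== SOURCE A (Python) =====
-- def charge_to_indice(charge):
--     buffer = 0
--     i = 0
--     res = []
--     for c in charge:
--         res.append((i ,buffer, buffer + c))
--         i += 1
--         buffer += c
--     return res
-- ===== SOURCE B (Python) =====
-- def charge_to_indice(charge):
--     # Materialize the full prefix-sum table, then pair adjacent entries.
--     S = [0]
--     for c in charge:
--         S.append(S[-1] + c)
--     return list(zip(range(len(charge)), S, S[1:]))
-- ===== Notes on version B (the rewrite author's own statement) =====
-- stated objective: idiomatic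
-- what changed: B materializes the full prefix-sum table first and then builds the result by zipping the index range with adjacent table entries (S and S[1:]), instead of emitting tuples incrementally from a running buffer and index counter.
import Mathlib
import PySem

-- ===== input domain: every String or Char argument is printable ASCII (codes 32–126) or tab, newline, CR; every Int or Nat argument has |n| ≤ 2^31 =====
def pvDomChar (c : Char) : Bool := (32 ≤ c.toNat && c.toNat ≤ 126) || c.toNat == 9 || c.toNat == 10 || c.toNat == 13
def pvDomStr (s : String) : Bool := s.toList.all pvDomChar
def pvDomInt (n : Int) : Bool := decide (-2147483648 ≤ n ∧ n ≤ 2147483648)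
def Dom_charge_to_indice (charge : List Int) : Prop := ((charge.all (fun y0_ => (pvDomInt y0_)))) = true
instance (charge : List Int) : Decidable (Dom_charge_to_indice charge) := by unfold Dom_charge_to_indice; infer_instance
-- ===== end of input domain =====

-- B materializes the full prefix-sum table and pairs adjacent entries (zip) instead of
-- emitting tuples incrementally from a running buffer; objective: idiomatic, same cost.

-- ===== PORT A =====
-- state (i, buffer, res); res.append((i, buffer, buffer + c)) before updating i and buffer
def charge_to_indice (charge : List Int) : List (Int × Int × Int) :=
  (charge.foldl (fun (st : Int × Int × List (Int × Int × Int)) c =>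
      (st.1 + 1, st.2.1 + c, st.2.2 ++ [(st.1, st.2.1, st.2.1 + c)])) (0, 0, [])).2.2

-- ===== PORT B =====
-- Python's zip over three lists, producing triples
def pyZip3 : List Int → List Int → List Int → List (Int × Int × Int)
  | i :: is, a :: as_, b :: bs => (i, a, b) :: pyZip3 is as_ bs
  | _, _, _ => []

def charge_to_indice_alt (charge : List Int) : List (Int × Int × Int) :=
  -- S = [0]; for c in charge: S.append(S[-1] + c)   (S is never empty, so S[-1] cannot raise; .getD 0 is unreachable)
  let S := charge.foldl (fun s c => s ++ [(PySem.List.pyGet? s (-1)).getD 0 + c]) [0]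
  pyZip3 (PySem.List.pyRange 0 charge.length 1) S (PySem.List.slice S (some 1) none)

-- ===== PRECONDITION & SPEC =====
def Spec_charge_to_indice (charge : List Int) (out : List (Int × Int × Int)) : Prop := out = charge_to_indice_alt charge
instance (charge : List Int) (out : List (Int × Int × Int)) : Decidable (Spec_charge_to_indice charge out) := by unfold Spec_charge_to_indice; infer_instance

-- ===== CLAIM (what is proved, stated in full; the proofs are below) =====
def Claim_equal_charge_to_indice : Prop := ∀ (charge : List Int), Dom_charge_to_indice charge → Spec_charge_to_indice charge (charge_to_indice charge)

-- ===== LEMMAS AND PROOFS =====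

-- the common specification: the triples (i, b, b+c) with running index and running sum
def pvGen (i b : Int) : List Int → List (Int × Int × Int)
  | [] => []
  | c :: t => (i, b, b + c) :: pvGen (i + 1) (b + c) t

-- tail of the prefix-sum table, starting from accumulated value b
def pvScan (b : Int) : List Int → List Int
  | [] => []
  | c :: t => (b + c) :: pvScan (b + c) t

theorem pvA_fold (l : List Int) : ∀ (i b : Int) (res : List (Int × Int × Int)),
    (l.foldl (fun (st : Int × Int × List (Int × Int × Int)) c =>
      (st.1 + 1, st.2.1 + c, st.2.2 ++ [(st.1, st.2.1, st.2.1 + c)])) (i, b, res)).2.2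
    = res ++ pvGen i b l := by
  induction l with
  | nil => intro i b res; simp [pvGen]
  | cons c t ih => intro i b res; simp [List.foldl, pvGen, ih]

theorem pvB_fold (l : List Int) : ∀ (S0 : List Int) (x : Int),
    l.foldl (fun s c => s ++ [(PySem.List.pyGet? s (-1)).getD 0 + c]) (S0 ++ [x])
    = S0 ++ [x] ++ pvScan x l := by
  induction l with
  | nil => intro S0 x; simp [pvScan]
  | cons c t ih =>
    intro S0 x
    simp only [List.foldl, PySem.List.pyGet?_neg_one_append_singleton, Option.getD_some, pvScan]
    rw [ih (S0 ++ [x]) (x + c)]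
    simp

theorem pvZip_gen (l : List Int) : ∀ (i b : Int),
    pyZip3 (PySem.List.pyRange i (i + l.length) 1) (b :: pvScan b l) (pvScan b l)
    = pvGen i b l := by
  induction l with
  | nil => intro i b; simp [pvScan, pvGen, pyZip3]
  | cons c t ih =>
    intro i b
    rw [PySem.List.pyRange_one_cons (by simp)]
    simp only [pvScan, pyZip3, pvGen, List.length_cons]
    have h : i + (↑(t.length + 1) : Int) = (i + 1) + (↑t.length : Int) := by omega
    rw [h]
    exact congrArg (List.cons (i, b, b + c)) (ih (i + 1) (b + c))

-- ===== VERDICT (by name: the statement is the Claim_ definition above) =====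
theorem charge_to_indice_spec : Claim_equal_charge_to_indice := by
  intro charge _
  unfold Spec_charge_to_indice charge_to_indice charge_to_indice_alt
  have hB := pvB_fold charge [] 0
  simp only [List.nil_append] at hB
  simp only [pvA_fold charge 0 0 [], hB, PySem.List.slice_from_one, List.nil_append]
  have := pvZip_gen charge 0 0
  simpa using this.symm
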